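-- pv_equiv track=rewrite | github.com/bioinfocao/pymaf | mpUtils.py | getCmdArgs
-- ===== SOURCE A (Python) =====
-- def getCmdArgs(argv):
--     """
--     Parse command line argvs
--     Example: python test.py test.txt --useZip -b bfile
--     pos_arg_list
--     ['test.py', 'test.txt']
--     named_arg_dict
--     {'--useZip': None, '-b': 'bfile'}
--     """
--     pos_arg_list=[] # position arguments
--     named_arg_dict = {}  # Empty dictionary to store key-value pairs.
--     argv=[el.strip(" ") for el in argv]
--     while argv:  # While there are arguments left to parse...
--         if argv[0][0] == '-':
--             if argv[0][0:2] == '--': # Found a "--opt [value]"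
--                 if len(argv)>1 and (argv[1][0] != "-"):
--                     named_arg_dict[argv[0]] = argv[1]  # Add key and value to the dictionary.
--                     argv = argv[2:] # Reduce the argument list by copying it starting from index 2.
--                 else:
--                     named_arg_dict[argv[0]] = ""  # Add key and value to the dictionary.
--                     argv = argv[1:]
--             else: # Found a "-name value" pair.
--                 if len(argv)>1 and argv[1][0] != "-":
--                     named_arg_dict[argv[0]] = argv[1]  # Add key and value to the dictionary.
--                     argv = argv[2:] # Reduce the argument list by copying it starting from index 2.
--                 else:
--                     named_arg_dict[argv[0]] = None
--                     argv = argv[1:]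
--         else:
--             pos_arg_list.append(argv[0])
--             argv = argv[1:]
--     return pos_arg_list,named_arg_dict
-- ===== SOURCE B (Python) =====
-- def getCmdArgs(argv):
--     pos_arg_list = []
--     named_arg_dict = {}
--     pending = None  # (flag, is_long) awaiting a value
--     for el in argv:
--         token = el.strip(" ")
--         if token[0] == '-':
--             if pending is not None:
--                 flag, is_long = pending
--                 named_arg_dict[flag] = "" if is_long else None
--             pending = (token, token.startswith('--'))
--         elif pending is not None:
--             named_arg_dict[pending[0]] = token
--             pending = None
--         else:
--             pos_arg_list.append(token)
--     if pending is not None: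
--         flag, is_long = pending
--         named_arg_dict[flag] = "" if is_long else None
--     return pos_arg_list, named_arg_dict
-- ===== Notes on version B (the rewrite author's own statement) =====
-- stated objective: faster
-- what changed: B replaces A's while-loop with one-token lookahead and list re-slicing by a single forward pass holding a 'pending flag' state (flag plus long/short kind) that is resolved when its value or the next flag or the end of input arrives.
import Mathlib
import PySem

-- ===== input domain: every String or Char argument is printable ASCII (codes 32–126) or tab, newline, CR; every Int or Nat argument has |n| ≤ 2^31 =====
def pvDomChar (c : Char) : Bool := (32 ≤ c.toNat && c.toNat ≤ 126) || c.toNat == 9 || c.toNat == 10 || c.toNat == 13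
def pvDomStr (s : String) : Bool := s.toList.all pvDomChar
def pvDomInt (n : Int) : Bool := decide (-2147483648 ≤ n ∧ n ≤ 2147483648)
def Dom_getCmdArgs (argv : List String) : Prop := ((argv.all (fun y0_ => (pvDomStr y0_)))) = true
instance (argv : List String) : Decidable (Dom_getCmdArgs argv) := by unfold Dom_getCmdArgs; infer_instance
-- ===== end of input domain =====

-- B replaces A's lookahead-and-reslice while-loop by a one-pass state machine with a pending flag; alternative decomposition, same results.

-- ===== PORT A =====
-- A's `while argv:` loop; `argv = argv[1:]` / `argv[2:]` becomes recursion on the tails.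
def getCmdArgsLoopA (argv : List String) (pos : List String)
    (named : PySem.Dict String (Option String)) :
    List String × PySem.Dict String (Option String) :=
  match argv with
  | [] => (pos, named)
  | a :: rest =>
    if PySem.Str.pyGet? a 0 = some '-' then        -- argv[0][0] == '-' (Pre_ excludes the IndexError on "")
      if PySem.Str.slice a (some 0) (some 2) = "--" then  -- argv[0][0:2] == '--'
        match rest with
        | b :: rest2 =>
          if PySem.Str.pyGet? b 0 ≠ some '-' then  -- len(argv)>1 and argv[1][0] != '-'
            getCmdArgsLoopA rest2 pos (named.insert a (some b))
          else
            getCmdArgsLoopA (b :: rest2) pos (named.insert a (some ""))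
        | [] => getCmdArgsLoopA [] pos (named.insert a (some ""))
      else
        match rest with
        | b :: rest2 =>
          if PySem.Str.pyGet? b 0 ≠ some '-' then
            getCmdArgsLoopA rest2 pos (named.insert a (some b))
          else
            getCmdArgsLoopA (b :: rest2) pos (named.insert a none)
        | [] => getCmdArgsLoopA [] pos (named.insert a none)
    else
      getCmdArgsLoopA rest (pos ++ [a]) named

def getCmdArgs (argv : List String) : List String × (List (String × Option String)) :=
  let stripped := argv.map (fun el => PySem.Str.stripChars el " ")   -- [el.strip(" ") for el in argv]
  let r := getCmdArgsLoopA stripped [] PySem.Dict.empty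
  (r.1, r.2.items)

-- ===== PORT B =====
-- B's single forward pass: `pending` holds the last flag awaiting a value plus whether it was long.
def pendingDefault (p : String × Bool) : Option String :=
  if p.2 then some "" else none

def getCmdArgsLoopB (tokens : List String) (pos : List String)
    (named : PySem.Dict String (Option String)) (pending : Option (String × Bool)) :
    List String × PySem.Dict String (Option String) :=
  match tokens with
  | [] =>
    match pending with
    | some p => (pos, named.insert p.1 (pendingDefault p))
    | none => (pos, named)
  | t :: rest =>
    if PySem.Str.pyGet? t 0 = some '-' then        -- token[0] == '-'
      let named' :=
        match pending with
        | some p => named.insert p.1 (pendingDefault p)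
        | none => named
      getCmdArgsLoopB rest pos named' (some (t, PySem.Str.startswith t "--"))
    else
      match pending with
      | some p => getCmdArgsLoopB rest pos (named.insert p.1 (some t)) none
      | none => getCmdArgsLoopB rest (pos ++ [t]) named none

def getCmdArgs_alt (argv : List String) : List String × (List (String × Option String)) :=
  let stripped := argv.map (fun el => PySem.Str.stripChars el " ")
  let r := getCmdArgsLoopB stripped [] PySem.Dict.empty none
  (r.1, r.2.items)

-- ===== PRECONDITION & SPEC =====
-- Pre_ excludes exactly the inputs where some argument strips to "", on which Python A (and B) raise IndexError at token[0].
def Pre_getCmdArgs (argv : List String) : Prop :=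
  ∀ s ∈ argv, PySem.Str.stripChars s " " ≠ ""
instance (argv : List String) : Decidable (Pre_getCmdArgs argv) := by unfold Pre_getCmdArgs; infer_instance

def pvWitness_getCmdArgs : List String := ["test.py", "test.txt", "--useZip", "-b", "bfile"]

def Spec_getCmdArgs (argv : List String) (out : List String × (List (String × Option String))) : Prop := out = getCmdArgs_alt argv
instance (argv : List String) (out : List String × (List (String × Option String))) : Decidable (Spec_getCmdArgs argv out) := by unfold Spec_getCmdArgs; infer_instance

-- ===== CLAIM (what is proved, stated in full; the proofs are below) =====
def Claim_equal_getCmdArgs : Prop := ∀ (argv : List String), Dom_getCmdArgs argv → Pre_getCmdArgs argv → Spec_getCmdArgs argv (getCmdArgs argv)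

-- ===== LEMMAS AND PROOFS =====

-- A's test argv[0][0:2] == '--' coincides with B's token.startswith('--').
lemma slice2_eq_startswith (f : String) :
    (PySem.Str.slice f (some 0) (some 2) = "--") ↔ PySem.Str.startswith f "--" = true := by
  rw [show (PySem.Str.slice f (some 0) (some 2) = "--")
        ↔ (PySem.Str.slice f (some 0) (some 2)).toList = "--".toList from
      ⟨fun h => by rw [h], fun h => String.toList_injective h⟩]
  simp [pysem]
  exact ⟨fun h => h ▸ List.take_prefix 2 f.toList,
         fun h => by simpa using (List.prefix_iff_eq_take.mp h).symm⟩

-- base cases of the loop correspondence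
lemma main_nil (pos : List String) (named : PySem.Dict String (Option String)) :
    getCmdArgsLoopA [] pos named = getCmdArgsLoopB [] pos named none := rfl

lemma cross_nil (pos : List String) (named : PySem.Dict String (Option String)) (f : String)
    (hf : PySem.Str.pyGet? f 0 = some '-') :
    getCmdArgsLoopA [f] pos named
      = getCmdArgsLoopB [] pos named (some (f, PySem.Str.startswith f "--")) := by
  have hf' : PySem.List.pyGet? f.toList 0 = some '-' := by simpa using hf
  by_cases hl : PySem.Str.startswith f "--" = true
  · have hsl := (slice2_eq_startswith f).mpr hl
    have hl' : PySem.Chars.startswith f.toList ['-', '-'] = true := by simpa using hl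
    simp [getCmdArgsLoopA, getCmdArgsLoopB, pendingDefault, hf', hsl, hl']
  · have hsl := mt (slice2_eq_startswith f).mp hl
    have hl' : ¬ PySem.Chars.startswith f.toList ['-', '-'] = true := by simpa using hl
    simp [getCmdArgsLoopA, getCmdArgsLoopB, pendingDefault, hf', hsl, hl']

-- main + cross invariant: B with no pending flag mirrors A; B with pending (f, …) mirrors A restarted at f.
lemma loops_eq (n : Nat) : ∀ tokens pos named, tokens.length ≤ n →
    (getCmdArgsLoopA tokens pos named = getCmdArgsLoopB tokens pos named none) ∧
    (∀ f, PySem.Str.pyGet? f 0 = some '-' →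
      getCmdArgsLoopA (f :: tokens) pos named
        = getCmdArgsLoopB tokens pos named (some (f, PySem.Str.startswith f "--"))) := by
  induction n with
  | zero =>
    intro tokens pos named h
    have htok : tokens = [] := List.eq_nil_of_length_eq_zero (Nat.le_zero.mp h)
    subst htok
    exact ⟨main_nil pos named, fun f hf => cross_nil pos named f hf⟩
  | succ n ih =>
    intro tokens pos named h
    cases tokens with
    | nil => exact ⟨main_nil pos named, fun f hf => cross_nil pos named f hf⟩
    | cons t rest =>
      have hrest : rest.length ≤ n := by simpa using Nat.le_of_succ_le_succ h
      constructor
      · by_cases ht : PySem.Str.pyGet? t 0 = some '-'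
        · have ht' : PySem.List.pyGet? t.toList 0 = some '-' := by simpa using ht
          rw [(ih rest pos named hrest).2 t ht]
          simp [getCmdArgsLoopB, ht']
        · have ht' : ¬ PySem.List.pyGet? t.toList 0 = some '-' := by simpa using ht
          have hA : getCmdArgsLoopA (t :: rest) pos named
              = getCmdArgsLoopA rest (pos ++ [t]) named := by
            rw [getCmdArgsLoopA.eq_def]; simp [ht']
          rw [hA]
          simpa [getCmdArgsLoopB, ht'] using (ih rest (pos ++ [t]) named hrest).1
      · intro f hf
        have hf' : PySem.List.pyGet? f.toList 0 = some '-' := by simpa using hf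
        by_cases ht : PySem.Str.pyGet? t 0 = some '-'
        · have ht' : PySem.List.pyGet? t.toList 0 = some '-' := by simpa using ht
          by_cases hl : PySem.Str.startswith f "--" = true
          · have hsl := (slice2_eq_startswith f).mpr hl
            have hl' : PySem.Chars.startswith f.toList ['-', '-'] = true := by simpa using hl
            simpa [getCmdArgsLoopA, getCmdArgsLoopB, pendingDefault, hf', ht', hsl, hl'] using
              (ih rest pos (named.insert f (some "")) hrest).2 t ht
          · have hsl := mt (slice2_eq_startswith f).mp hl
            have hl' : ¬ PySem.Chars.startswith f.toList ['-', '-'] = true := by simpa using hl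
            simpa [getCmdArgsLoopA, getCmdArgsLoopB, pendingDefault, hf', ht', hsl, hl'] using
              (ih rest pos (named.insert f none) hrest).2 t ht
        · have ht' : ¬ PySem.List.pyGet? t.toList 0 = some '-' := by simpa using ht
          by_cases hsl : PySem.Str.slice f (some 0) (some 2) = "--"
          · simpa [getCmdArgsLoopA, getCmdArgsLoopB, hf', ht', hsl] using
              (ih rest pos (named.insert f (some t)) hrest).1
          · simpa [getCmdArgsLoopA, getCmdArgsLoopB, hf', ht', hsl] using
              (ih rest pos (named.insert f (some t)) hrest).1

-- ===== VERDICT (by name: the statement is the Claim_ definition above) =====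
theorem getCmdArgs_spec : Claim_equal_getCmdArgs := by
  intro argv _ _
  unfold Spec_getCmdArgs getCmdArgs getCmdArgs_alt
  exact congrArg (fun r => (r.1, r.2.items)) (loops_eq _ _ _ _ le_rfl).1
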